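-- pv_equiv track=rewrite | github.com/SaiHarsha9992/Geeks-for-Geeks | Two repeated elements.py | twoRepeated
-- ===== SOURCE A (Python) =====
-- def twoRepeated(arr , N):
--     #Your code here
--     my_map = {}
--     ans = []
--     for key in arr:
--         if len(ans)==2:
--             break
--         if key in my_map:
--             my_map[key]+=1
--             if my_map[key]==2:
--                 ans.append(key)
--         else:
--             my_map[key]=1
--     return ans
-- ===== SOURCE B (Python) =====
-- def twoRepeated(arr, N):
--     # Staged passes, no running count table: for each distinct value occurring
--     # at least twice, locate its second-occurrence index, then sort the
--     # (index, value) pairs by that index and keep the first two values.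
--     pairs = []
--     for x in set(arr):
--         if arr.count(x) >= 2:
--             j = arr.index(x, arr.index(x) + 1)
--             pairs.append((j, x))
--     pairs.sort(key=lambda p: p[0])
--     return [x for _, x in pairs[:2]]
-- ===== Notes on version B (the rewrite author's own statement) =====
-- stated objective: alternative
-- what changed: Replaces A's single early-exit pass with a count table by staged passes: for each distinct value with count >= 2 find its second-occurrence index via list.index, sort the (index, value) pairs by index, and take the first two values.
import Mathlib
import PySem

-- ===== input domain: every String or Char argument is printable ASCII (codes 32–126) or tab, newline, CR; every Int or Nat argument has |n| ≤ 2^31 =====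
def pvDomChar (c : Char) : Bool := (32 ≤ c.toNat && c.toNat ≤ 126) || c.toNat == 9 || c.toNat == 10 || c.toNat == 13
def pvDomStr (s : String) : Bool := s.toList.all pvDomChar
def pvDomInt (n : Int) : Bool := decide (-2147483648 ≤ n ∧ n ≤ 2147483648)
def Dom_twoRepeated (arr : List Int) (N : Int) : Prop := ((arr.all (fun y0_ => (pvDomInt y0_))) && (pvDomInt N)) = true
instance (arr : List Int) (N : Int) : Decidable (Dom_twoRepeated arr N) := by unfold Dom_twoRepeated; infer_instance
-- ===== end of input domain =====

-- B replaces A's early-exit counting pass by staged passes (second-occurrence index per distinct value, sort, take two); same values proved equal.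

-- ===== PORT A =====
-- A's loop: count table my_map, append key when its count reaches 2, break once len(ans)==2.
def twoRepeatedLoopA (rest : List Int) (d : PySem.Dict Int Int) (ans : List Int) : List Int :=
  match rest with
  | [] => ans
  | key :: rs =>
    if ans.length == 2 then ans
    else if d.contains key then
      let d' := d.insert key (d.getD key 0 + 1)
      if d'.getD key 0 == 2 then twoRepeatedLoopA rs d' (ans ++ [key])
      else twoRepeatedLoopA rs d' ans
    else twoRepeatedLoopA rs (d.insert key 1) ans

def twoRepeated (arr : List Int) (N : Int) : List Int :=
  twoRepeatedLoopA arr PySem.Dict.empty []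

-- ===== PORT B =====
-- arr.index(x, start) has no PySem primitive; ported by hand (exact): first match in arr,
-- then first match in the remainder after it, i.e. the second-occurrence index.
def secondIdx (arr : List Int) (x : Int) : Option Nat :=
  match PySem.List.index? arr x with
  | none => none
  | some f => (PySem.List.index? (arr.drop (f + 1)) x).map (fun k => f + 1 + k)

-- B: pairs = [(second index of x, x) for distinct x with count >= 2]; sort by index; take 2.
def twoRepeated_alt (arr : List Int) (N : Int) : List Int :=
  let pairs := (PySem.Set.ofList arr).foldl (fun acc x =>
    if 2 ≤ arr.count x then
      match secondIdx arr x with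
      | some j => acc ++ [((j : Int), x)]
      | none => acc   -- unreachable: count ≥ 2 guarantees a second occurrence
    else acc) []
  ((PySem.List.sorted pairs (fun p => p.1) false).take 2).map (fun p => p.2)

-- ===== PRECONDITION & SPEC =====
def Spec_twoRepeated (arr : List Int) (N : Int) (out : List Int) : Prop := out = twoRepeated_alt arr N
instance (arr : List Int) (N : Int) (out : List Int) : Decidable (Spec_twoRepeated arr N out) := by unfold Spec_twoRepeated; infer_instance

-- ===== CLAIM (what is proved, stated in full; the proofs are below) =====
def Claim_equal_twoRepeated : Prop := ∀ (arr : List Int) (N : Int), Dom_twoRepeated arr N → Spec_twoRepeated arr N (twoRepeated arr N)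

-- ===== LEMMAS AND PROOFS =====

-- The canonical list of (second-occurrence index, value) pairs of p ++ rest, restricted
-- to second occurrences happening inside rest (p is the already-consumed prefix).
def secsPairsP (p rest : List Int) : List (Int × Int) :=
  match rest with
  | [] => []
  | x :: rs =>
    if p.count x == 1 then ((p.length : Int), x) :: secsPairsP (p ++ [x]) rs
    else secsPairsP (p ++ [x]) rs

lemma Aloop_eq (rest : List Int) :
    ∀ (p : List Int) (d : PySem.Dict Int Int) (ans : List Int),
    (∀ k, d.getD k 0 = (p.count k : Int)) →
    (∀ k, d.contains k = decide (k ∈ p)) →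
    ans.length ≤ 2 →
    twoRepeatedLoopA rest d ans = (ans ++ (secsPairsP p rest).map (·.2)).take 2 := by
  induction rest with
  | nil => intro p d ans _ _ hle; simp [twoRepeatedLoopA, secsPairsP, List.take_of_length_le hle]
  | cons x rs ih =>
    intro p d ans hcount hmem hle
    simp only [twoRepeatedLoopA, secsPairsP]
    by_cases hl : ans.length = 2
    · rw [if_pos (by simp [hl]), List.take_left' hl]
    · have hlt : ans.length < 2 := lt_of_le_of_ne hle hl
      simp only [show (ans.length == 2) = false by simp [hl], Bool.false_eq_true, if_false]
      by_cases hx : x ∈ p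
      · have hc : d.contains x = true := by rw [hmem]; simp [hx]
        have hg : d.getD x 0 = (p.count x : Int) := hcount x
        simp only [hc, if_true]
        have hget : (d.insert x (d.getD x 0 + 1)).getD x 0 = (p.count x : Int) + 1 := by
          rw [PySem.Dict.getD_insert_self, hg]
        have hcount' : ∀ k, (d.insert x (d.getD x 0 + 1)).getD k 0 = ((p ++ [x]).count k : Int) := by
          intro k
          rw [PySem.Dict.getD_insert]
          by_cases hk : k = x
          · subst hk; simp [hg, List.count_append]
          · simp [hk, hcount k, List.count_append, Ne.symm hk]
        have hmem' : ∀ k, (d.insert x (d.getD x 0 + 1)).contains k = decide (k ∈ p ++ [x]) := by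
          intro k
          rw [PySem.Dict.contains_insert, hmem]
          by_cases hk : k = x <;> simp [hk]
        by_cases h1 : p.count x = 1
        · have h2 : ((d.insert x (d.getD x 0 + 1)).getD x 0 == 2) = true := by
            rw [hget, h1]; decide
          have hcond : ((p.count x : Nat) == 1) = true := by simp [h1]
          simp only [h2, hcond, if_true]
          rw [ih (p ++ [x]) _ (ans ++ [x]) hcount' hmem' (by simp; omega)]
          simp
        · have h2 : ((d.insert x (d.getD x 0 + 1)).getD x 0 == 2) = false := by
            rw [hget]; simp; omega
          have hcond : ((p.count x : Nat) == 1) = false := by simp [h1]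
          simp only [h2, hcond, Bool.false_eq_true, if_false]
          exact ih (p ++ [x]) _ ans hcount' hmem' hle
      · have hc : d.contains x = false := by rw [hmem]; simp [hx]
        have hz : p.count x = 0 := List.count_eq_zero.mpr hx
        have hcond : ((p.count x : Nat) == 1) = false := by simp [hz]
        simp only [hc, Bool.false_eq_true, if_false, hcond]
        have hcount' : ∀ k, (d.insert x 1).getD k 0 = ((p ++ [x]).count k : Int) := by
          intro k
          rw [PySem.Dict.getD_insert]
          by_cases hk : k = x
          · subst hk; simp [List.count_append, hz]
          · simp [hk, hcount k, List.count_append, Ne.symm hk]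
        have hmem' : ∀ k, (d.insert x 1).contains k = decide (k ∈ p ++ [x]) := by
          intro k
          rw [PySem.Dict.contains_insert, hmem]
          by_cases hk : k = x <;> simp [hk]
        exact ih (p ++ [x]) _ ans hcount' hmem' hle

lemma count_one_split (pre : List Int) (x : Int) (h : pre.count x = 1) :
    ∃ p1 p2, pre = p1 ++ x :: p2 ∧ x ∉ p1 ∧ x ∉ p2 := by
  have hx : x ∈ pre := List.count_pos_iff.mp (by omega)
  obtain ⟨k, hk⟩ := Option.isSome_iff_exists.mp ((Iff.mpr (PySem.List.index?_isSome_iff _ _)) hx)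
  obtain ⟨p1, p2, hsplit, _, hnot⟩ := (Iff.mp (PySem.List.index?_eq_some_iff _ _ _)) hk
  refine ⟨p1, p2, hsplit, hnot, ?_⟩
  have := h
  rw [hsplit] at this
  simp [List.count_append, List.count_eq_zero.mpr hnot] at this
  exact List.count_eq_zero.mp this

lemma secondIdx_spec (arr : List Int) (x : Int) (jn : Nat) :
    secondIdx arr x = some jn ↔
      ∃ pre suf, arr = pre ++ x :: suf ∧ pre.length = jn ∧ pre.count x = 1 := by
  constructor
  · intro h
    unfold secondIdx at h
    cases hf : PySem.List.index? arr x with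
    | none => rw [hf] at h; simp at h
    | some f =>
      rw [hf] at h
      simp only [Option.map_eq_some_iff] at h
      obtain ⟨k, hk, hjn⟩ := h
      obtain ⟨a1, a2, ha, hlen1, hna1⟩ := (Iff.mp (PySem.List.index?_eq_some_iff _ _ _)) hf
      have hdrop : arr.drop (f + 1) = a2 := by
        rw [ha, show a1 ++ x :: a2 = (a1 ++ [x]) ++ a2 by simp,
          show f + 1 = (a1 ++ [x]).length by simp [hlen1], List.drop_left]
      rw [hdrop] at hk
      obtain ⟨b1, b2, hb, hlen2, hnb1⟩ := (Iff.mp (PySem.List.index?_eq_some_iff _ _ _)) hk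
      refine ⟨a1 ++ x :: b1, b2, ?_, ?_, ?_⟩
      · rw [ha, hb]; simp
      · simp [hlen1, hlen2]; omega
      · simp [List.count_append, List.count_eq_zero.mpr hna1, List.count_eq_zero.mpr hnb1]
  · rintro ⟨pre, suf, ha, hlen, hc⟩
    obtain ⟨p1, p2, hp, hn1, hn2⟩ := count_one_split pre x hc
    have ha2 : arr = p1 ++ x :: (p2 ++ x :: suf) := by rw [ha, hp]; simp
    have hf : PySem.List.index? arr x = some p1.length :=
      (Iff.mpr (PySem.List.index?_eq_some_iff _ _ _)) ⟨p1, p2 ++ x :: suf, ha2, rfl, hn1⟩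
    have hdrop : arr.drop (p1.length + 1) = p2 ++ x :: suf := by
      rw [ha2, show p1 ++ x :: (p2 ++ x :: suf) = (p1 ++ [x]) ++ (p2 ++ x :: suf) by simp,
        show p1.length + 1 = (p1 ++ [x]).length by simp, List.drop_left]
    have hk : PySem.List.index? (arr.drop (p1.length + 1)) x = some p2.length := by
      rw [hdrop]; exact (Iff.mpr (PySem.List.index?_eq_some_iff _ _ _)) ⟨p2, suf, rfl, rfl, hn2⟩
    simp only [secondIdx, hf, hk, Option.map_some, Option.some.injEq]
    rw [← hlen, hp]; simp; omega

lemma secondIdx_isSome (arr : List Int) (x : Int) (h : 2 ≤ arr.count x) :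
    ∃ jn, secondIdx arr x = some jn := by
  have hx : x ∈ arr := List.count_pos_iff.mp (by omega)
  obtain ⟨f, hf⟩ := Option.isSome_iff_exists.mp ((Iff.mpr (PySem.List.index?_isSome_iff _ _)) hx)
  obtain ⟨a1, a2, ha, hlen1, hna1⟩ := (Iff.mp (PySem.List.index?_eq_some_iff _ _ _)) hf
  have hdrop : arr.drop (f + 1) = a2 := by
    rw [ha, show a1 ++ x :: a2 = (a1 ++ [x]) ++ a2 by simp,
      show f + 1 = (a1 ++ [x]).length by simp [hlen1], List.drop_left]
  have hca : arr.count x = a2.count x + 1 := by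
    rw [ha]; simp [List.count_append, List.count_eq_zero.mpr hna1]
  have hx2 : x ∈ a2 := List.count_pos_iff.mp (by omega)
  obtain ⟨k, hk⟩ := Option.isSome_iff_exists.mp ((Iff.mpr (PySem.List.index?_isSome_iff _ _)) hx2)
  exact ⟨f + 1 + k, by simp only [secondIdx, hf, hdrop, hk, Option.map_some]⟩

lemma secsPairsP_fst_lt (rest : List Int) :
    ∀ (p : List Int),
    (∀ q ∈ secsPairsP p rest, (p.length : Int) ≤ q.1) ∧
    (secsPairsP p rest).Pairwise (fun a b => a.1 < b.1) := by
  induction rest with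
  | nil => intro p; simp [secsPairsP]
  | cons x rs ih =>
    intro p
    obtain ⟨hlb, hpw⟩ := ih (p ++ [x])
    have hlb' : ∀ q ∈ secsPairsP (p ++ [x]) rs, (p.length : Int) + 1 ≤ q.1 := by
      intro q hq; have := hlb q hq; simpa using this
    simp only [secsPairsP]
    by_cases h1 : p.count x = 1
    · rw [if_pos (by simp [h1])]
      constructor
      · intro q hq
        rcases List.mem_cons.mp hq with h | h
        · simp [h]
        · have := hlb' q h; omega
      · exact List.pairwise_cons.mpr ⟨fun q hq => by have := hlb' q hq; simp; omega, hpw⟩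
    · rw [if_neg (by simp [h1])]
      exact ⟨fun q hq => by have := hlb' q hq; omega, hpw⟩

lemma mem_secsPairsP (rest : List Int) :
    ∀ (p : List Int) (q : Int × Int),
    q ∈ secsPairsP p rest ↔
      ∃ pre suf, rest = pre ++ q.2 :: suf ∧ q.1 = ((p.length + pre.length : Nat) : Int) ∧
        (p ++ pre).count q.2 = 1 := by
  induction rest with
  | nil =>
    intro p q
    simp only [secsPairsP, List.not_mem_nil, false_iff]
    rintro ⟨pre, suf, h, -, -⟩
    exact absurd h (by simp)
  | cons x rs ih =>
    intro p q
    simp only [secsPairsP]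
    by_cases h1 : p.count x = 1
    · rw [if_pos (by simp [h1])]
      simp only [List.mem_cons, ih (p ++ [x]) q]
      constructor
      · rintro (hq | ⟨pre, suf, hrs, hj, hc⟩)
        · refine ⟨[], rs, by simp [hq], by simp [hq], ?_⟩
          rw [show q.2 = x by rw [hq]]
          simpa using h1
        · refine ⟨x :: pre, suf, by simp [hrs], ?_, ?_⟩
          · rw [hj]; push_cast; simp; ring
          · simpa using hc
      · rintro ⟨pre, suf, hrs, hj, hc⟩
        cases pre with
        | nil =>
          left
          simp only [List.nil_append, List.cons.injEq] at hrs
          obtain ⟨hx, -⟩ := hrs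
          have : q.1 = (p.length : Int) := by simpa using hj
          cases q
          simp_all
        | cons y pre' =>
          right
          simp only [List.cons_append, List.cons.injEq] at hrs
          obtain ⟨hy, hrs'⟩ := hrs
          refine ⟨pre', suf, hrs', ?_, ?_⟩
          · rw [hj]; push_cast; simp; ring
          · rw [← hc, hy]; simp
    · rw [if_neg (by simp [h1])]
      rw [ih (p ++ [x]) q]
      constructor
      · rintro ⟨pre, suf, hrs, hj, hc⟩
        refine ⟨x :: pre, suf, by simp [hrs], ?_, ?_⟩
        · rw [hj]; push_cast; simp; ring
        · simpa using hc
      · rintro ⟨pre, suf, hrs, hj, hc⟩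
        cases pre with
        | nil =>
          exfalso
          simp only [List.nil_append, List.cons.injEq] at hrs
          obtain ⟨hx, -⟩ := hrs
          rw [← hx] at hc
          simp at hc
          exact h1 hc
        | cons y pre' =>
          simp only [List.cons_append, List.cons.injEq] at hrs
          obtain ⟨hy, hrs'⟩ := hrs
          refine ⟨pre', suf, hrs', ?_, ?_⟩
          · rw [hj]; push_cast; simp; ring
          · rw [← hc, hy]; simp

lemma sorted_pairs_eq (arr : List Int) :
    PySem.List.sorted
      ((PySem.Set.ofList arr).foldl (fun acc x =>
        if 2 ≤ arr.count x then
          match secondIdx arr x with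
          | some j => acc ++ [((j : Int), x)]
          | none => acc
        else acc) []) (fun p => p.1) false = secsPairsP [] arr := by
  have hfold : (PySem.Set.ofList arr).foldl (fun acc x =>
        if 2 ≤ arr.count x then
          match secondIdx arr x with
          | some j => acc ++ [((j : Int), x)]
          | none => acc
        else acc) []
      = ((PySem.Set.ofList arr).filter (fun x => decide (2 ≤ arr.count x))).map
          (fun x => ((((secondIdx arr x).getD 0 : Nat) : Int), x)) := by
    rw [PySem.List.foldl_congr_mem (PySem.Set.ofList arr) _
      (fun acc x => if 2 ≤ arr.count x then
          acc ++ [((((secondIdx arr x).getD 0 : Nat) : Int), x)] else acc) []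
      (by
        intro acc x hx
        by_cases hc : 2 ≤ arr.count x
        · obtain ⟨jn, hj⟩ := secondIdx_isSome arr x hc
          simp [hc, hj]
        · simp [hc])]
    rw [PySem.List.foldl_append_ite (p := fun x => 2 ≤ arr.count x)
      (f := fun x => ((((secondIdx arr x).getD 0 : Nat) : Int), x))]
    simp
  rw [hfold]
  have hmemS : ∀ q : Int × Int, q ∈ secsPairsP [] arr ↔
      ∃ pre suf, arr = pre ++ q.2 :: suf ∧ q.1 = (pre.length : Int) ∧ pre.count q.2 = 1 := by
    intro q
    rw [mem_secsPairsP arr [] q]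
    simp
  apply PySem.List.sorted_eq_of_perm_of_pairwise_lt
  · -- (secsPairsP [] arr).Perm (map g filter)
    rw [List.perm_ext_iff_of_nodup
      (((secsPairsP_fst_lt arr []).2).imp (fun h => by intro he; rw [he] at h; exact lt_irrefl _ h))
      (List.Nodup.map_on
        (fun x hx y hy hxy => by simpa using congrArg Prod.snd hxy)
        ((PySem.Set.nodup_ofList arr).filter _))]
    intro q
    rw [hmemS q]
    constructor
    · rintro ⟨pre, suf, ha, hj, hc⟩
      refine List.mem_map.mpr ⟨q.2, List.mem_filter.mpr ⟨?_, ?_⟩, ?_⟩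
      · exact (PySem.Set.mem_ofList ..).mpr (by rw [ha]; simp)
      · simp only [decide_eq_true_eq]
        rw [ha]; simp [List.count_append, hc]; omega
      · have hsi : secondIdx arr q.2 = some pre.length :=
          (secondIdx_spec arr q.2 pre.length).mpr ⟨pre, suf, ha, rfl, hc⟩
        rw [hsi]
        cases q; simp_all
    · intro hq
      obtain ⟨x, hxf, hgx⟩ := List.mem_map.mp hq
      obtain ⟨hxs, hcx⟩ := List.mem_filter.mp hxf
      simp only [decide_eq_true_eq] at hcx
      obtain ⟨jn, hj⟩ := secondIdx_isSome arr x hcx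
      obtain ⟨pre, suf, ha, hlen, hc1⟩ := (secondIdx_spec arr x jn).mp hj
      refine ⟨pre, suf, ?_, ?_, ?_⟩
      · rw [← hgx]; exact ha
      · rw [← hgx]; simp [hj, hlen]
      · rw [← hgx]; simpa [hlen] using hc1
  · exact (secsPairsP_fst_lt arr []).2

-- ===== VERDICT (by name: the statement is the Claim_ definition above) =====
theorem twoRepeated_spec : Claim_equal_twoRepeated := by
  intro arr N _
  unfold Spec_twoRepeated twoRepeated twoRepeated_alt
  simp only [sorted_pairs_eq arr]
  rw [Aloop_eq arr [] PySem.Dict.empty []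
    (fun k => by simp [PySem.Dict.getD_empty])
    (fun k => by simp [PySem.Dict.contains_empty]) (by simp)]
  simp [List.map_take]
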